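-- pv_equiv track=rewrite | github.com/lioarce01/soc-multi-agent-system | ui/components/agent_orchestration.py | create_minimal_pipeline
-- ===== SOURCE A (Python) =====
-- DEFAULT_PIPELINE_ORDER = [
--     "supervisor",
--     "enrichment",
--     "analysis",
--     "investigation",
--     "response",
--     "communication",
-- ]
--
-- def create_minimal_pipeline(current_step: int = 0) -> str:
--     """
--     Creates a minimal pipeline indicator
--
--     Args:
--         current_step: 0-based index of current step
--
--     Returns:
--         HTML string for minimal pipeline
--     """
--     steps = len(DEFAULT_PIPELINE_ORDER)
--     dots_html = ""
--
--     for i in range(steps):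
--         if i < current_step:
--             dot_class = "completed"
--         elif i == current_step:
--             dot_class = "active"
--         else:
--             dot_class = "pending"
--
--         dots_html += f'<span class="pipeline-dot {dot_class}"></span>'
--
--     return f"""
--     <div class="minimal-pipeline" style="display: flex; gap: 8px; align-items: center;">
--         {dots_html}
--     </div>
--     """
-- ===== SOURCE B (Python) =====
-- DEFAULT_PIPELINE_ORDER = [
--     "supervisor",
--     "enrichment",
--     "analysis",
--     "investigation",
--     "response",
--     "communication",
-- ]
--
-- def create_minimal_pipeline(current_step: int = 0) -> str:
--     steps = len(DEFAULT_PIPELINE_ORDER)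
--     completed = max(0, min(current_step, steps))
--     active = 1 if 0 <= current_step < steps else 0
--     pending = steps - completed - active
--     dots_html = (
--         '<span class="pipeline-dot completed"></span>' * completed
--         + '<span class="pipeline-dot active"></span>' * active
--         + '<span class="pipeline-dot pending"></span>' * pending
--     )
--     return f"""
--     <div class="minimal-pipeline" style="display: flex; gap: 8px; align-items: center;">
--         {dots_html}
--     </div>
--     """
-- ===== Notes on version B (the rewrite author's own statement) =====
-- stated objective: simpler
-- what changed: Replaces the per-index loop with a three-way branch by arithmetic on segment counts (completed/active/pending) and string multiplication to build the dots.
import Mathlib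
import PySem

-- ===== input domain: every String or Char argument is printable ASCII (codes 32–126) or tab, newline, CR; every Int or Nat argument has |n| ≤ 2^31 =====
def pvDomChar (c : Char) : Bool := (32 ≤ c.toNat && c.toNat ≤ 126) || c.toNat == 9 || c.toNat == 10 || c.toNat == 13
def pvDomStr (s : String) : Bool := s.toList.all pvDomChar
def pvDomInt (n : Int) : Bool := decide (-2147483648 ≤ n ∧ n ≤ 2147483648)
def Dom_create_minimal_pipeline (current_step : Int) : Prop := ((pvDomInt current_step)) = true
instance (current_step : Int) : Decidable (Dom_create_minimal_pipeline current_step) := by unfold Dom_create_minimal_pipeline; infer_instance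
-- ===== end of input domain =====

-- B replaces A's per-index classification loop with segment counts and string repetition; objective: simpler.

set_option maxRecDepth 100000
set_option maxHeartbeats 2000000

-- ===== PORT A =====
def pvPipelineOrder : List String :=
  ["supervisor", "enrichment", "analysis", "investigation", "response", "communication"]

def create_minimal_pipeline (current_step : Int) : String :=
  let steps : Int := (pvPipelineOrder.length : Int)
  let dots_html := (PySem.List.pyRange 0 steps 1).foldl (fun acc i =>
    let dot_class : String :=
      if i < current_step then "completed"
      else if i == current_step then "active"
      else "pending"
    acc ++ ("<span class=\"pipeline-dot " ++ dot_class ++ "\"></span>")) ""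
  "\n    <div class=\"minimal-pipeline\" style=\"display: flex; gap: 8px; align-items: center;\">\n        "
    ++ dots_html ++ "\n    </div>\n    "

-- ===== PORT B =====
-- string * n of Python
def pvRepeat (s : String) (n : Nat) : String :=
  match n with
  | 0 => ""
  | n + 1 => s ++ pvRepeat s n

def create_minimal_pipeline_alt (current_step : Int) : String :=
  let steps : Int := (pvPipelineOrder.length : Int)
  let completed : Nat := (max 0 (min current_step steps)).toNat
  let active : Nat := if 0 ≤ current_step ∧ current_step < steps then 1 else 0
  let pending : Nat := steps.toNat - completed - active
  let dots_html :=
    pvRepeat "<span class=\"pipeline-dot completed\"></span>" completed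
    ++ pvRepeat "<span class=\"pipeline-dot active\"></span>" active
    ++ pvRepeat "<span class=\"pipeline-dot pending\"></span>" pending
  "\n    <div class=\"minimal-pipeline\" style=\"display: flex; gap: 8px; align-items: center;\">\n        "
    ++ dots_html ++ "\n    </div>\n    "

-- ===== PRECONDITION & SPEC =====
def Spec_create_minimal_pipeline (current_step : Int) (out : String) : Prop := out = create_minimal_pipeline_alt current_step
instance (current_step : Int) (out : String) : Decidable (Spec_create_minimal_pipeline current_step out) := by unfold Spec_create_minimal_pipeline; infer_instance

-- ===== CLAIM (what is proved, stated in full; the proofs are below) =====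
def Claim_equal_create_minimal_pipeline : Prop := ∀ (current_step : Int), Dom_create_minimal_pipeline current_step → Spec_create_minimal_pipeline current_step (create_minimal_pipeline current_step)

-- ===== LEMMAS AND PROOFS =====

lemma pvRange06 : PySem.List.pyRange 0 6 1 = [0, 1, 2, 3, 4, 5] := by decide

-- ===== VERDICT (by name: the statement is the Claim_ definition above) =====
theorem create_minimal_pipeline_spec : Claim_equal_create_minimal_pipeline := by
  intro cs _
  unfold Spec_create_minimal_pipeline
  rcases lt_or_ge cs 0 with hneg | hpos
  · have h1 : (max 0 (min cs 6)).toNat = 0 := by omega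
    have h2 : ¬ ((0:Int) ≤ cs ∧ cs < 6) := by omega
    simp [create_minimal_pipeline, create_minimal_pipeline_alt, pvPipelineOrder,
      pvRange06, pvRepeat, h1, h2]
    split_ifs <;> first | omega | rfl
  · rcases lt_or_ge cs 6 with hlt | hge
    · interval_cases cs <;> rfl
    · have h1 : (max 0 (min cs 6)).toNat = 6 := by omega
      have h2 : ¬ ((0:Int) ≤ cs ∧ cs < 6) := by omega
      simp [create_minimal_pipeline, create_minimal_pipeline_alt, pvPipelineOrder,
        pvRange06, pvRepeat, h1, h2]
      split_ifs <;> first | omega | rfl
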